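-- pv_equiv track=rewrite | github.com/stevehoover/conversion-to-TLV | convert.py | to_extended_json
-- ===== SOURCE A (Python) =====
-- def to_extended_json(json_str):
--   # Iterate over the characters of the JSON string, keeping track of whether we are within a string, and replacing '\n' with newlines.
--   ejson = ""
--   in_string = False
--   prev_c = None
--   for c in json_str:
--     if c == '"':
--       in_string = not in_string
--     if prev_c == '\\' and c == 'n' and in_string:
--       prev_c = None
--       c = '\n'
--     if prev_c != None:
--       ejson += prev_c
--     prev_c = c
--   if prev_c != None:
--     ejson += prev_c
--   return ejson
-- ===== SOURCE B (Python) =====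
-- def to_extended_json(json_str):
--   # Split on the double-quote character: even-indexed segments are outside strings, odd ones inside.
--   segs = json_str.split('"')
--   return '"'.join(seg if i % 2 == 0 else seg.replace('\\n', '\n')
--                   for i, seg in enumerate(segs))
-- ===== Notes on version B (the rewrite author's own statement) =====
-- stated objective: simpler
-- what changed: Replaces the character-by-character scan with explicit in_string/prev_c state by splitting the input on the double-quote character (segments alternate outside/inside string), applying str.replace of the backslash-n escape by a newline to the odd (in-string) segments only, and rejoining with the double-quote character.
import Mathlib
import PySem

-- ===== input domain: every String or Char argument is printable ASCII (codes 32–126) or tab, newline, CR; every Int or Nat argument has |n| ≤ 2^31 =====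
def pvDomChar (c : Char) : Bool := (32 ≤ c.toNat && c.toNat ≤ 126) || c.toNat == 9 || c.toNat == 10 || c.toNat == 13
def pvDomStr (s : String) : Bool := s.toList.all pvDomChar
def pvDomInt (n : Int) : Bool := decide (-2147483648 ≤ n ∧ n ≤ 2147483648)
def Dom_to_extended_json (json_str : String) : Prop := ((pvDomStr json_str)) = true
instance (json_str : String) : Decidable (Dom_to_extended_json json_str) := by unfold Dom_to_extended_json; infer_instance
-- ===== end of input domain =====

-- B splits the input on the double-quote character (segments alternate outside/inside string),
-- replaces the backslash-n escapes in the odd (in-string) segments and rejoins, instead of A's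
-- char-by-char scan with explicit in_string/prev_c state: simpler.


-- ===== PORT A =====
-- one iteration of A's loop; state = (ejson as chars, in_string, prev_c)
def toExtStepA (st : List Char × Bool × Option Char) (c : Char) : List Char × Bool × Option Char :=
  match st with
  | (e, b, prev) =>
    let b' := if c = '"' then !b else b
    match prev with
    | some p =>
      if p = '\\' ∧ c = 'n' ∧ b' = true then (e, b', some '\n')
      else (e ++ [p], b', some c)
    | none => (e, b', some c)

-- the trailing "if prev_c != None: ejson += prev_c"
def pvFin (st : List Char × Bool × Option Char) : List Char :=
  match st.2.2 with
  | some p => st.1 ++ [p]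
  | none => st.1

def to_extended_json (json_str : String) : String :=
  String.ofList (pvFin (json_str.toList.foldl toExtStepA ([], false, none)))

-- ===== PORT B =====
def to_extended_json_alt (json_str : String) : String :=
  String.ofList (PySem.Chars.join ['"']
    ((PySem.List.enumerate (PySem.Chars.splitOn json_str.toList ['"']) 0).map
      (fun p => if PySem.Int.mod p.1 2 = 0 then p.2 else PySem.Chars.replace p.2 ['\\', 'n'] ['\n'])))

-- ===== PRECONDITION & SPEC =====
def Spec_to_extended_json (json_str : String) (out : String) : Prop := out = to_extended_json_alt json_str
instance (json_str : String) (out : String) : Decidable (Spec_to_extended_json json_str out) := by unfold Spec_to_extended_json; infer_instance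

-- ===== CLAIM (what is proved, stated in full; the proofs are below) =====
def Claim_equal_to_extended_json : Prop := ∀ (json_str : String), Dom_to_extended_json json_str → Spec_to_extended_json json_str (to_extended_json json_str)

-- ===== LEMMAS AND PROOFS =====

-- the common specification: scan with an in-string flag, replacing in-string "\n" pairs
def pvF : Bool → List Char → List Char
  | _, [] => []
  | b, '"' :: r => '"' :: pvF (!b) r
  | true, '\\' :: 'n' :: r => '\n' :: pvF true r
  | b, c :: r => c :: pvF b r

-- greedy non-overlapping replacement of "\n" by newline
def pvRepl : List Char → List Char
  | [] => []
  | '\\' :: 'n' :: r => '\n' :: pvRepl r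
  | c :: r => c :: pvRepl r

-- splitting on '"' with an accumulated first segment
def pvSplit (pre : List Char) : List Char → List (List Char)
  | [] => [pre]
  | c :: r => if c = '"' then pre :: pvSplit [] r else pvSplit (pre ++ [c]) r

-- keep even segments, pvRepl the odd ones
def pvProcs (b : Bool) : List (List Char) → List (List Char)
  | [] => []
  | s :: ss => (if b then pvRepl s else s) :: pvProcs (!b) ss

-- A's loop with a pending prev character
def pvG (b : Bool) (p : Char) : List Char → List Char
  | [] => [p]
  | c :: r =>
    if p = '\\' ∧ c = 'n' ∧ (if c = '"' then !b else b) = true then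
      pvG (if c = '"' then !b else b) '\n' r
    else p :: pvG (if c = '"' then !b else b) c r

theorem pvF_nil (b : Bool) : pvF b [] = [] := rfl

theorem pvF_quote (b : Bool) (r : List Char) : pvF b ('"' :: r) = '"' :: pvF (!b) r := rfl

theorem pvF_bn (r : List Char) : pvF true ('\\' :: 'n' :: r) = '\n' :: pvF true r := rfl

theorem pvF_def (b : Bool) (c : Char) (r : List Char) (h1 : c ≠ '"')
    (h2 : b = false ∨ c ≠ '\\' ∨ r.head? ≠ some 'n') : pvF b (c :: r) = c :: pvF b r := by
  rw [pvF.eq_def]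
  split <;> simp_all

theorem pvRepl_nil : pvRepl [] = [] := rfl

theorem pvRepl_bn (r : List Char) : pvRepl ('\\' :: 'n' :: r) = '\n' :: pvRepl r := rfl

theorem pvRepl_def (c : Char) (r : List Char) (h : c ≠ '\\' ∨ r.head? ≠ some 'n') :
    pvRepl (c :: r) = c :: pvRepl r := by
  rw [pvRepl.eq_def]
  split <;> simp_all

theorem pvFoldA (l : List Char) : ∀ (e : List Char) (b : Bool) (p : Char),
    pvFin (l.foldl toExtStepA (e, b, some p)) = e ++ pvG b p l := by
  induction l with
  | nil => intro e b p; simp [pvFin, pvG]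
  | cons c r ih =>
    intro e b p
    simp only [List.foldl_cons]
    by_cases h : p = '\\' ∧ c = 'n' ∧ (if c = '"' then !b else b) = true
    · have hs : toExtStepA (e, b, some p) c = (e, if c = '"' then !b else b, some '\n') := by
        simp only [toExtStepA]
        rw [if_pos h]
      rw [hs, ih, pvG, if_pos h]
    · have hs : toExtStepA (e, b, some p) c = (e ++ [p], if c = '"' then !b else b, some c) := by
        simp only [toExtStepA]
        rw [if_neg h]
      rw [hs, ih, pvG, if_neg h]
      simp

theorem pvG_eq (l : List Char) : ∀ (b : Bool) (p : Char),
    pvG b p l = if p = '"' then '"' :: pvF b l else pvF b (p :: l) := by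
  induction l with
  | nil =>
    intro b p
    by_cases hp : p = '"'
    · subst hp; rw [pvG, if_pos rfl, pvF_nil]
    · rw [pvG, if_neg hp, pvF_def b p [] hp (by simp), pvF_nil]
  | cons c r ih =>
    intro b p
    by_cases h : p = '\\' ∧ c = 'n' ∧ (if c = '"' then !b else b) = true
    · obtain ⟨h1, h2, h3⟩ := h
      have hc : c ≠ '"' := by subst h2; decide
      rw [if_neg hc] at h3
      subst h1 h2 h3
      rw [pvG, if_pos (by decide)]
      have hbb : (if ('n' : Char) = '"' then !true else true) = true := by decide
      rw [hbb, ih, if_neg (by decide), if_neg (by decide), pvF_bn,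
          pvF_def true '\n' r (by decide) (Or.inr (Or.inl (by decide)))]
    · rw [pvG, if_neg h]
      by_cases hc : c = '"'
      · subst hc
        have hb' : (if ('"' : Char) = '"' then !b else b) = !b := if_pos rfl
        rw [hb', ih, if_pos rfl]
        by_cases hp : p = '"'
        · subst hp; rw [if_pos rfl, pvF_quote]
        · have hhd : (('"' : Char) :: r).head? ≠ some 'n' := by
            rw [List.head?_cons]
            intro hh
            exact absurd (Option.some.inj hh) (by decide)
          rw [if_neg hp, pvF_def b p ('"' :: r) hp (Or.inr (Or.inr hhd)), pvF_quote]
      · have hb' : (if c = '"' then !b else b) = b := if_neg hc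
        rw [hb', ih, if_neg hc]
        by_cases hp : p = '"'
        · subst hp; rw [if_pos rfl]
        · have h2 : b = false ∨ p ≠ '\\' ∨ (c :: r).head? ≠ some 'n' := by
            by_cases hb : b = true
            · by_cases hpb : p = '\\'
              · right; right
                rw [List.head?_cons]
                intro hh
                exact h ⟨hpb, Option.some.inj hh, by rw [hb', hb]⟩
              · right; left; exact hpb
            · left; simpa using hb
          rw [if_neg hp, pvF_def b p (c :: r) hp h2]

-- A equals the common spec
theorem pvA_eq (s : String) : to_extended_json s = String.ofList (pvF false s.toList) := by
  unfold to_extended_json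
  cases hl : s.toList with
  | nil => rfl
  | cons c r =>
    rw [List.foldl_cons]
    have hs : toExtStepA ([], false, none) c = ([], (if c = '"' then !false else false), some c) := by
      simp only [toExtStepA]
    rw [hs, pvFoldA, List.nil_append]
    congr 1
    rw [pvG_eq]
    by_cases hc : c = '"'
    · subst hc; simp [pvF_quote]
    · simp [hc]

theorem pvSplit_go (fuel : Nat) : ∀ (l cur : List Char) (accs : List (List Char)),
    l.length ≤ fuel →
    PySem.Chars.splitOn.go ['"'] fuel l cur accs = accs.reverse ++ pvSplit cur.reverse l := by
  induction fuel with
  | zero =>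
    intro l cur accs h
    have hl : l = [] := List.length_eq_zero_iff.mp (Nat.le_zero.mp h)
    subst hl
    simp [PySem.Chars.splitOn.go, pvSplit]
  | succ n ih =>
    intro l cur accs h
    cases l with
    | nil => simp [PySem.Chars.splitOn.go, pvSplit]
    | cons c rest =>
      rw [PySem.Chars.splitOn.go]
      have hlen : rest.length ≤ n := Nat.le_of_succ_le_succ (by simpa using h)
      by_cases hc : c = '"'
      · subst hc
        have hpre : List.isPrefixOf ['"'] ('"' :: rest) = true := by
          simp [List.isPrefixOf]
        rw [if_pos hpre]
        have hdrop : List.drop (['"'] : List Char).length ('"' :: rest) = rest := by simp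
        rw [hdrop, ih rest [] (cur.reverse :: accs) hlen, pvSplit, if_pos rfl]
        simp
      · have hpre : ¬(List.isPrefixOf ['"'] (c :: rest) = true) := by
          intro hh
          simp [List.isPrefixOf] at hh
          exact hc hh.symm
        rw [if_neg hpre, ih rest (c :: cur) accs hlen, pvSplit, if_neg hc]
        simp

theorem pvSplit_eq (l : List Char) : PySem.Chars.splitOn l ['"'] = pvSplit [] l := by
  rw [PySem.Chars.splitOn, pvSplit_go (l.length + 1) l [] [] (by omega)]
  rfl

theorem pvRepl_go (fuel : Nat) : ∀ (l acc : List Char),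
    l.length ≤ fuel →
    PySem.Chars.replace.go ['\\', 'n'] ['\n'] fuel l acc = acc.reverse ++ pvRepl l := by
  induction fuel with
  | zero =>
    intro l acc h
    have hl : l = [] := List.length_eq_zero_iff.mp (Nat.le_zero.mp h)
    subst hl
    simp [PySem.Chars.replace.go, pvRepl_nil]
  | succ n ih =>
    intro l acc h
    cases l with
    | nil => simp [PySem.Chars.replace.go, pvRepl_nil]
    | cons c t =>
      rw [PySem.Chars.replace.go]
      cases t with
      | nil =>
        have hpre : ¬(List.isPrefixOf ['\\', 'n'] [c] = true) := by
          simp [List.isPrefixOf]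
        rw [if_neg hpre, ih [] (c :: acc) (by simp),
            pvRepl_def c [] (Or.inr (by simp)), pvRepl_nil]
        simp
      | cons d t' =>
        by_cases hcd : c = '\\' ∧ d = 'n'
        · obtain ⟨h1, h2⟩ := hcd
          subst h1 h2
          have hpre : List.isPrefixOf ['\\', 'n'] ('\\' :: 'n' :: t') = true := by
            simp [List.isPrefixOf]
          rw [if_pos hpre]
          have hlen : t'.length ≤ n := by simp at h; omega
          have hdrop : List.drop (['\\', 'n'] : List Char).length ('\\' :: 'n' :: t') = t' := by
            simp
          have hacc : (['\n'] : List Char).reverse ++ acc = '\n' :: acc := by simp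
          rw [hdrop, hacc, ih t' ('\n' :: acc) hlen, pvRepl_bn]
          simp
        · have hpre : ¬(List.isPrefixOf ['\\', 'n'] (c :: d :: t') = true) := by
            intro hh
            simp [List.isPrefixOf] at hh
            exact hcd ⟨hh.1.symm, hh.2.symm⟩
          rw [if_neg hpre, ih (d :: t') (c :: acc) (by simp at h ⊢; omega)]
          have hrd : c ≠ '\\' ∨ (d :: t').head? ≠ some 'n' := by
            by_cases hc1 : c = '\\'
            · right
              rw [List.head?_cons]
              intro hh
              exact hcd ⟨hc1, Option.some.inj hh⟩
            · exact Or.inl hc1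
          rw [pvRepl_def c (d :: t') hrd]
          simp

theorem pvRepl_eq (l : List Char) : PySem.Chars.replace l ['\\', 'n'] ['\n'] = pvRepl l := by
  rw [PySem.Chars.replace, if_neg (by simp), pvRepl_go l.length l [] (Nat.le_refl _)]
  rfl

theorem pvEnum_eq (ss : List (List Char)) : ∀ (k : Nat),
    (PySem.List.enumerate ss ((k : Nat) : Int)).map
      (fun p => if PySem.Int.mod p.1 2 = 0 then p.2 else PySem.Chars.replace p.2 ['\\', 'n'] ['\n'])
      = pvProcs (decide (k % 2 = 1)) ss := by
  induction ss with
  | nil => intro k; simp [PySem.List.enumerate_nil, pvProcs]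
  | cons s ss ih =>
    intro k
    have hcast : ((k : Int) + 1) = (((k + 1 : Nat)) : Int) := by push_cast; ring
    have hmod : PySem.Int.mod (k : Int) 2 = ((k % 2 : Nat) : Int) := by
      exact_mod_cast PySem.Int.mod_natCast k 2
    rw [PySem.List.enumerate_cons, List.map_cons, hcast, ih (k + 1), pvProcs]
    have hhead : (if PySem.Int.mod (k : Int) 2 = 0 then s
          else PySem.Chars.replace s ['\\', 'n'] ['\n'])
        = (if decide (k % 2 = 1) then pvRepl s else s) := by
      rw [hmod, pvRepl_eq]
      by_cases hk : k % 2 = 1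
      · rw [if_neg (by rw [hk]; decide), if_pos (by simp [hk])]
      · have hk0 : k % 2 = 0 := by omega
        rw [if_pos (by simp [hk0]), if_neg (by simp [hk])]
    have htail : decide ((k + 1) % 2 = 1) = !decide (k % 2 = 1) := by
      by_cases hk : k % 2 = 1
      · simp [hk, (by omega : (k + 1) % 2 = 0)]
      · simp [hk, (by omega : (k + 1) % 2 = 1)]
    show (if PySem.Int.mod (k : Int) 2 = 0 then s
          else PySem.Chars.replace s ['\\', 'n'] ['\n'])
        :: pvProcs (decide ((k + 1) % 2 = 1)) ss
      = (if decide (k % 2 = 1) then pvRepl s else s) :: pvProcs (!decide (k % 2 = 1)) ss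
    rw [hhead, htail]

theorem pvEnum_eq0 (ss : List (List Char)) :
    (PySem.List.enumerate ss 0).map
      (fun p => if PySem.Int.mod p.1 2 = 0 then p.2 else PySem.Chars.replace p.2 ['\\', 'n'] ['\n'])
      = pvProcs false ss := by
  simpa using pvEnum_eq ss 0

theorem pvSplit_ne_nil (l : List Char) : ∀ pre, pvSplit pre l ≠ [] := by
  induction l with
  | nil => intro pre; simp [pvSplit]
  | cons c r ih => intro pre; rw [pvSplit]; split <;> simp [ih]

theorem pvSplit_no_quote (l : List Char) (h : '"' ∉ l) : ∀ pre, pvSplit pre l = [pre ++ l] := by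
  induction l with
  | nil => intro pre; simp [pvSplit]
  | cons c r ih =>
    intro pre
    have hc : c ≠ '"' := fun hc => h (hc ▸ List.mem_cons_self)
    rw [pvSplit, if_neg hc, ih (fun hm => h (List.mem_cons_of_mem _ hm))]
    simp

theorem pvF_no_quote (n : Nat) : ∀ (l : List Char), l.length ≤ n → '"' ∉ l → ∀ b,
    pvF b l = if b then pvRepl l else l := by
  induction n with
  | zero =>
    intro l h _ b
    have : l = [] := List.length_eq_zero_iff.mp (Nat.le_zero.mp h)
    subst this
    cases b <;> simp [pvF_nil, pvRepl_nil]
  | succ n ih =>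
    intro l h hq b
    cases l with
    | nil => cases b <;> simp [pvF_nil, pvRepl_nil]
    | cons c r =>
      have hc : c ≠ '"' := fun hc => hq (hc ▸ List.mem_cons_self)
      have hqr : '"' ∉ r := fun hm => hq (List.mem_cons_of_mem _ hm)
      have hr : r.length ≤ n := by simpa using Nat.le_of_succ_le_succ (by simpa using h)
      by_cases hbn : b = true ∧ c = '\\' ∧ r.head? = some 'n'
      · obtain ⟨hb, hcb, hhd⟩ := hbn
        cases r with
        | nil => simp at hhd
        | cons d r' =>
          have hd : d = 'n' := by simpa using hhd
          subst hb hcb hd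
          rw [pvF_bn, pvRepl_bn]
          have hqr' : '"' ∉ r' := fun hm => hqr (List.mem_cons_of_mem _ hm)
          have hih := ih r' (by simp at hr; omega) hqr' true
          rw [if_pos rfl] at hih
          rw [hih]
          simp
      · have h2 : b = false ∨ c ≠ '\\' ∨ r.head? ≠ some 'n' := by
          by_cases hb : b = true
          · by_cases hcb : c = '\\'
            · right; right; intro hhd; exact hbn ⟨hb, hcb, hhd⟩
            · right; left; exact hcb
          · left; simpa using hb
        rw [pvF_def b c r hc h2, ih r hr hqr b]
        cases b with
        | false => simp
        | true =>
          have hrd : c ≠ '\\' ∨ r.head? ≠ some 'n' := by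
            rcases h2 with h2 | h2 | h2
            · exact absurd h2 (by simp)
            · exact Or.inl h2
            · exact Or.inr h2
          rw [pvRepl_def c r hrd]
          simp

theorem pvF_seg (n : Nat) : ∀ (seg : List Char), seg.length ≤ n → '"' ∉ seg →
    ∀ (rest : List Char) (b : Bool),
    pvF b (seg ++ '"' :: rest) = (if b then pvRepl seg else seg) ++ '"' :: pvF (!b) rest := by
  induction n with
  | zero =>
    intro seg h _ rest b
    have : seg = [] := List.length_eq_zero_iff.mp (Nat.le_zero.mp h)
    subst this
    cases b <;> simp [pvF_quote, pvRepl_nil]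
  | succ n ih =>
    intro seg h hq rest b
    cases seg with
    | nil => cases b <;> simp [pvF_quote, pvRepl_nil]
    | cons c r =>
      have hc : c ≠ '"' := fun hc => hq (hc ▸ List.mem_cons_self)
      have hqr : '"' ∉ r := fun hm => hq (List.mem_cons_of_mem _ hm)
      have hr : r.length ≤ n := by simpa using Nat.le_of_succ_le_succ (by simpa using h)
      by_cases hbn : b = true ∧ c = '\\' ∧ r.head? = some 'n'
      · obtain ⟨hb, hcb, hhd⟩ := hbn
        cases r with
        | nil => simp at hhd
        | cons d r' =>
          have hd : d = 'n' := by simpa using hhd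
          subst hb hcb hd
          have hqr' : '"' ∉ r' := fun hm => hqr (List.mem_cons_of_mem _ hm)
          have hih := ih r' (by simp at hr; omega) hqr' rest true
          rw [if_pos rfl] at hih
          rw [List.cons_append, List.cons_append, pvF_bn, hih, pvRepl_bn]
          simp
      · have hhd2 : b = false ∨ c ≠ '\\' ∨ (r ++ '"' :: rest).head? ≠ some 'n' := by
          by_cases hb : b = true
          · by_cases hcb : c = '\\'
            · right; right
              intro hhd
              apply hbn
              refine ⟨hb, hcb, ?_⟩
              cases r with
              | nil => simp at hhd
              | cons d r' => simpa using hhd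
            · right; left; exact hcb
          · left; simpa using hb
        rw [List.cons_append, pvF_def b c (r ++ '"' :: rest) hc hhd2, ih r hr hqr rest b]
        cases b with
        | false => simp
        | true =>
          have hrd : c ≠ '\\' ∨ r.head? ≠ some 'n' := by
            rcases hhd2 with h2 | h2 | h2
            · exact absurd h2 (by simp)
            · exact Or.inl h2
            · right
              intro hhd
              apply h2
              cases r with
              | nil => simp at hhd
              | cons d r' => simpa using hhd
          rw [pvRepl_def c r hrd]
          simp

theorem pvSplit_append (seg : List Char) : '"' ∉ seg → ∀ (pre l : List Char),
    pvSplit pre (seg ++ l) = pvSplit (pre ++ seg) l := by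
  induction seg with
  | nil => intro _ pre l; simp
  | cons c r ih =>
    intro hq pre l
    have hc : c ≠ '"' := fun hc => hq (hc ▸ List.mem_cons_self)
    rw [List.cons_append, pvSplit, if_neg hc, ih (fun hm => hq (List.mem_cons_of_mem _ hm))]
    simp

-- decomposition at the first quote
theorem pvDecomp (l : List Char) (h : '"' ∈ l) :
    ∃ seg rest, l = seg ++ '"' :: rest ∧ '"' ∉ seg ∧ rest.length < l.length := by
  induction l with
  | nil => simp at h
  | cons c r ih =>
    by_cases hc : c = '"'
    · subst hc
      exact ⟨[], r, by simp, by simp, by simp⟩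
    · have hr : '"' ∈ r := by
        rcases List.mem_cons.mp h with h1 | h1
        · exact absurd h1.symm hc
        · exact h1
      obtain ⟨seg, rest, heq, hnq, hlt⟩ := ih hr
      exact ⟨c :: seg, rest, by simp [heq], by simp [hnq, Ne.symm hc], by simp; omega⟩

theorem pvMain (n : Nat) : ∀ (l : List Char), l.length ≤ n → ∀ (b : Bool),
    pvF b l = PySem.Chars.join ['"'] (pvProcs b (pvSplit [] l)) := by
  induction n with
  | zero =>
    intro l h b
    have : l = [] := List.length_eq_zero_iff.mp (Nat.le_zero.mp h)
    subst this
    cases b <;> simp [pvSplit, pvProcs, PySem.Chars.join_singleton, pvRepl_nil, pvF_nil]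
  | succ n ih =>
    intro l h b
    by_cases hq : '"' ∈ l
    · obtain ⟨seg, rest, heq, hnq, hlt⟩ := pvDecomp l hq
      subst heq
      have hrest : rest.length ≤ n := by simp at h; omega
      rw [pvF_seg seg.length seg (Nat.le_refl _) hnq rest b,
          pvSplit_append seg hnq [] ('"' :: rest), List.nil_append, pvSplit, if_pos rfl, pvProcs]
      cases hss : pvSplit [] rest with
      | nil => exact absurd hss (pvSplit_ne_nil rest [])
      | cons s2 ss2 =>
        have hih := ih rest hrest (!b)
        rw [hss] at hih
        have hpp : pvProcs (!b) (s2 :: ss2)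
            = (if !b then pvRepl s2 else s2) :: pvProcs (!!b) ss2 := by
          rw [pvProcs]
        rw [hpp, PySem.Chars.join_cons_cons, ← hpp, ← hih]
        simp
    · rw [pvSplit_no_quote l hq [], List.nil_append, pvProcs, pvProcs,
          PySem.Chars.join_singleton, pvF_no_quote l.length l (Nat.le_refl _) hq b]

-- B equals the common spec
theorem pvB_eq (s : String) : to_extended_json_alt s = String.ofList (pvF false s.toList) := by
  unfold to_extended_json_alt
  rw [pvSplit_eq, pvEnum_eq0, ← pvMain s.toList.length s.toList (Nat.le_refl _) false]

-- ===== VERDICT (by name: the statement is the Claim_ definition above) =====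
theorem to_extended_json_spec : Claim_equal_to_extended_json := by
  intro s _
  unfold Spec_to_extended_json
  rw [pvA_eq, pvB_eq]
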